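-- pv_equiv track=rewrite | github.com/TBIAPBC/APBC2026 | A2/the-other-thanos-Administration.py | find_pairings
-- ===== SOURCE A (Python) =====
-- def find_pairings(unpaired_cities, municipality_cost, budget, current_pairs=None, current_cost=0):
--     if current_pairs==None:
--         current_pairs=[]
--     if not unpaired_cities:
--         return [current_pairs]
--
--     minimum_cost=min(municipality_cost.values())
--     minimum_additional_cost=((len(unpaired_cities)//2)-1)*minimum_cost
--
--     results=[]
--     first_unpaired = unpaired_cities[0]
--
--     for i in range(1, len(unpaired_cities)):
--         second_unpaired = unpaired_cities[i]
--         pair = (first_unpaired, second_unpaired)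
--
--         if pair in municipality_cost:
--             new_cost = municipality_cost.get(pair)+current_cost
--
--             if new_cost > budget - minimum_additional_cost:
--                 continue
--
--             new_remaining = unpaired_cities[1:i] + unpaired_cities[i+1:]
--
--             results+=find_pairings(new_remaining, municipality_cost, budget, current_pairs + [pair], new_cost)
--     return results
-- ===== SOURCE B (Python) =====
-- def find_pairings(unpaired_cities, municipality_cost, budget, current_pairs=None, current_cost=0):
--     # Breadth-first frontier expansion: each round pairs off the first city of
--     # every partial state at once; completed states are read off at the end.
--     states = [(unpaired_cities, [] if current_pairs is None else current_pairs, current_cost)]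
--     if unpaired_cities:
--         min_cost = min(municipality_cost.values())
--     while states and states[0][0]:
--         new_states = []
--         for cities, pairs, cost in states:
--             bound = budget - ((len(cities) // 2) - 1) * min_cost
--             first = cities[0]
--             for i in range(1, len(cities)):
--                 pair = (first, cities[i])
--                 if pair in municipality_cost:
--                     new_cost = cost + municipality_cost[pair]
--                     if new_cost <= bound:
--                         new_states.append((cities[1:i] + cities[i + 1:], pairs + [pair], new_cost))
--         states = new_states
--     return [pairs for cities, pairs, cost in states]
-- ===== Notes on version B (the rewrite author's own statement) =====
-- stated objective: alternative
-- what changed: A's recursive depth-first backtracking is replaced by a round-based breadth-first frontier expansion: one loop iteration pairs off the first city of every partial state simultaneously (the dict minimum hoisted out and computed once), and the completed matchings are read off the final frontier; since all completions lie at the same depth, the left-to-right frontier order equals A's DFS pre-order.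
import Mathlib
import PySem

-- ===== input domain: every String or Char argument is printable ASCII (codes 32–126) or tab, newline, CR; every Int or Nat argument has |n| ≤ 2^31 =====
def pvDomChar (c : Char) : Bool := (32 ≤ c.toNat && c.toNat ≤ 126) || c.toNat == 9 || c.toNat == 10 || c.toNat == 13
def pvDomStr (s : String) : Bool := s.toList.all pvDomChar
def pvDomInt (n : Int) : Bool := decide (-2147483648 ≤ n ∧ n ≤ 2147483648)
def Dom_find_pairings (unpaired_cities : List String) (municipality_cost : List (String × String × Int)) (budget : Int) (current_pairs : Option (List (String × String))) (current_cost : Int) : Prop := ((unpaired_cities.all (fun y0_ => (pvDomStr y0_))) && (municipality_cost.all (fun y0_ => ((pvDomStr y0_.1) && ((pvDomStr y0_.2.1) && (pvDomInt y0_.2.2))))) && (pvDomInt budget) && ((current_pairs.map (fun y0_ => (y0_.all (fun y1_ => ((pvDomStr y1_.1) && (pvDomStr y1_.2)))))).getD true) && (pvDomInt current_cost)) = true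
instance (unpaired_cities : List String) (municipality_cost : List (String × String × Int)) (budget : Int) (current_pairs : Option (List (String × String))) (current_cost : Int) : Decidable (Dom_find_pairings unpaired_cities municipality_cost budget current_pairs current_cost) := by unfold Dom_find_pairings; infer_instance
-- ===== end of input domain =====

-- B replaces A's recursive depth-first backtracking by a round-based breadth-first
-- frontier expansion with the dictionary minimum hoisted out (objective: alternative).

-- ===== PORT A =====
-- the Python dict parameter, built in insertion order with overwrite-in-place (shared by both ports)
def pvDict (mc : List (String × String × Int)) : PySem.Dict (String × String) Int :=
  mc.foldl (fun d t => PySem.Dict.insert d (t.1, t.2.1) t.2.2) PySem.Dict.empty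

-- literal port of A's recursion; fuel only makes the recursion structural (never
-- exhausted when started with length+1, proved by findA_fuel below)
def findA (fuel : Nat) (cities : List String) (d : PySem.Dict (String × String) Int)
    (budget : Int) (pairs : List (String × String)) (cost : Int) :
    List (List (String × String)) :=
  match fuel with
  | 0 => []
  | fuel + 1 =>
    if cities.isEmpty then [pairs]
    else
      match PySem.List.min? (PySem.Dict.values d) (fun v => v) with
      | none => []   -- Python: min() of an empty dict raises ValueError; outside Pre_
      | some m =>
        (PySem.List.pyRange 1 (cities.length : Int) 1).foldl
          (fun res i =>
            match PySem.Dict.get? d (PySem.List.pyGetD cities 0 "", PySem.List.pyGetD cities i "") with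
            | none => res
            | some c =>
              if c + cost > budget - (PySem.Int.floordiv (cities.length : Int) 2 - 1) * m then res
              else
                res ++ findA fuel
                  (PySem.List.slice cities (some 1) (some i) ++ PySem.List.slice cities (some (i + 1)) none)
                  d budget (pairs ++ [(PySem.List.pyGetD cities 0 "", PySem.List.pyGetD cities i "")]) (c + cost))
          []

def find_pairings (unpaired_cities : List String) (municipality_cost : List (String × String × Int)) (budget : Int) (current_pairs : Option (List (String × String))) (current_cost : Int) : List (List (String × String)) :=
  findA (unpaired_cities.length + 1) unpaired_cities (pvDict municipality_cost) budget
    (current_pairs.getD []) current_cost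

-- ===== PORT B =====
-- one round of Source B's while body: the two nested for-loops appending to new_states
def roundB (d : PySem.Dict (String × String) Int) (budget minCost : Int)
    (states : List (List String × List (String × String) × Int)) :
    List (List String × List (String × String) × Int) :=
  states.foldl
    (fun new_states s =>
      match s with
      | (cities, pairs, cost) =>
        (PySem.List.pyRange 1 (cities.length : Int) 1).foldl
          (fun new_states i =>
            match PySem.Dict.get? d (PySem.List.pyGetD cities 0 "", PySem.List.pyGetD cities i "") with
            | none => new_states
            | some c =>
              if cost + c ≤ budget - (PySem.Int.floordiv (cities.length : Int) 2 - 1) * minCost then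
                new_states ++
                  [(PySem.List.slice cities (some 1) (some i) ++ PySem.List.slice cities (some (i + 1)) none,
                    pairs ++ [(PySem.List.pyGetD cities 0 "", PySem.List.pyGetD cities i "")], cost + c)]
              else new_states)
          new_states)
    []

-- Source B's while loop; fuel only makes it structural (each round removes two cities
-- from every state, so length+1 rounds never run out)
def loopB (fuel : Nat) (d : PySem.Dict (String × String) Int) (budget minCost : Int)
    (states : List (List String × List (String × String) × Int)) :
    List (List String × List (String × String) × Int) :=
  match fuel with
  | 0 => states
  | fuel + 1 =>
    match states with
    | [] => states
    | (cities, _, _) :: _ =>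
      if cities.isEmpty then states
      else loopB fuel d budget minCost (roundB d budget minCost states)

def find_pairings_alt (unpaired_cities : List String) (municipality_cost : List (String × String × Int)) (budget : Int) (current_pairs : Option (List (String × String))) (current_cost : Int) : List (List (String × String)) :=
  -- Python computes min_cost once, only when unpaired_cities is nonempty; when they
  -- are empty the loop never runs and the value is never read, so 0 stands in
  (loopB (unpaired_cities.length + 1) (pvDict municipality_cost) budget
      (match PySem.List.min? (PySem.Dict.values (pvDict municipality_cost)) (fun v => v) with
       | none => 0
       | some m => m)
      [(unpaired_cities, current_pairs.getD [], current_cost)]).map (fun s => s.2.1)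

-- ===== PRECONDITION & SPEC =====
-- Pre_ excludes only the inputs where the Pythons raise ValueError: a non-empty city
-- list with an empty cost dict (min() of an empty sequence); both A and B raise there.
def Pre_find_pairings (unpaired_cities : List String) (municipality_cost : List (String × String × Int)) (budget : Int) (current_pairs : Option (List (String × String))) (current_cost : Int) : Prop :=
  unpaired_cities = [] ∨ municipality_cost ≠ []
instance (unpaired_cities : List String) (municipality_cost : List (String × String × Int)) (budget : Int) (current_pairs : Option (List (String × String))) (current_cost : Int) : Decidable (Pre_find_pairings unpaired_cities municipality_cost budget current_pairs current_cost) := by unfold Pre_find_pairings; infer_instance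

def pvWitness_find_pairings : List String × (List (String × String × Int)) × Int × (Option (List (String × String))) × Int :=
  (["a", "b", "c", "d"], [("a", "b", 3), ("a", "c", 2), ("c", "d", 4), ("b", "d", 1), ("b", "c", 5), ("a", "d", 2)], 10, none, 0)

def Spec_find_pairings (unpaired_cities : List String) (municipality_cost : List (String × String × Int)) (budget : Int) (current_pairs : Option (List (String × String))) (current_cost : Int) (out : List (List (String × String))) : Prop := out = find_pairings_alt unpaired_cities municipality_cost budget current_pairs current_cost
instance (unpaired_cities : List String) (municipality_cost : List (String × String × Int)) (budget : Int) (current_pairs : Option (List (String × String))) (current_cost : Int) (out : List (List (String × String))) : Decidable (Spec_find_pairings unpaired_cities municipality_cost budget current_pairs current_cost out) := by unfold Spec_find_pairings; infer_instance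

-- ===== CLAIM (what is proved, stated in full; the proofs are below) =====
def Claim_equal_find_pairings : Prop := ∀ (unpaired_cities : List String) (municipality_cost : List (String × String × Int)) (budget : Int) (current_pairs : Option (List (String × String))) (current_cost : Int), Dom_find_pairings unpaired_cities municipality_cost budget current_pairs current_cost → Pre_find_pairings unpaired_cities municipality_cost budget current_pairs current_cost → Spec_find_pairings unpaired_cities municipality_cost budget current_pairs current_cost (find_pairings unpaired_cities municipality_cost budget current_pairs current_cost)

-- ===== LEMMAS AND PROOFS =====

-- the partial function deciding whether partner index i yields a child state in B
def pvH (d : PySem.Dict (String × String) Int) (cities : List String)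
    (pairs : List (String × String)) (cost B : Int) (i : Int) :
    Option (List String × List (String × String) × Int) :=
  match PySem.Dict.get? d (PySem.List.pyGetD cities 0 "", PySem.List.pyGetD cities i "") with
  | none => none
  | some c =>
    if cost + c ≤ B then
      some (PySem.List.slice cities (some 1) (some i) ++ PySem.List.slice cities (some (i + 1)) none,
            pairs ++ [(PySem.List.pyGetD cities 0 "", PySem.List.pyGetD cities i "")], cost + c)
    else none

-- the per-index contribution of A's loop body (with the recursion at fuel cities.length)
def pvG (d : PySem.Dict (String × String) Int) (cities : List String)
    (pairs : List (String × String)) (cost budget m : Int) (i : Int) :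
    List (List (String × String)) :=
  match PySem.Dict.get? d (PySem.List.pyGetD cities 0 "", PySem.List.pyGetD cities i "") with
  | none => []
  | some c =>
    if c + cost > budget - (PySem.Int.floordiv (cities.length : Int) 2 - 1) * m then []
    else
      findA cities.length
        (PySem.List.slice cities (some 1) (some i) ++ PySem.List.slice cities (some (i + 1)) none)
        d budget (pairs ++ [(PySem.List.pyGetD cities 0 "", PySem.List.pyGetD cities i "")]) (c + cost)

-- the per-state list of children pushed by one round of B
def pvCh (d : PySem.Dict (String × String) Int) (budget minCost : Int)
    (s : List String × List (String × String) × Int) :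
    List (List String × List (String × String) × Int) :=
  (PySem.List.pyRange 1 (s.1.length : Int) 1).filterMap
    (pvH d s.1 s.2.1 s.2.2 (budget - (PySem.Int.floordiv (s.1.length : Int) 2 - 1) * minCost))

theorem pv_len_child (cities : List String) (i : Int) (h1 : 1 ≤ i) (h2 : i < (cities.length : Int)) :
    (PySem.List.slice cities (some 1) (some i) ++ PySem.List.slice cities (some (i + 1)) none).length
      = cities.length - 2 := by
  obtain ⟨k, rfl⟩ := Int.eq_ofNat_of_zero_le (le_trans zero_le_one h1)
  have hk1 : 1 ≤ k := by exact_mod_cast h1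
  have hk2 : k < cities.length := by exact_mod_cast h2
  have e1 : PySem.List.slice cities (some 1) (some (k : Int)) = List.take (k - 1) (List.drop 1 cities) := by
    have := PySem.List.slice_natCast cities 1 k
    simpa using this
  have e2 : PySem.List.slice cities (some ((k : Int) + 1)) none = List.drop (k + 1) cities := by
    have := PySem.List.slice_from_natCast cities (k + 1)
    push_cast at this
    simpa using this
  rw [e1, e2]
  simp [List.length_take, List.length_drop]
  omega

theorem pv_get?_of_values_nil {d : PySem.Dict (String × String) Int}
    (h : PySem.Dict.values d = []) (k : String × String) : PySem.Dict.get? d k = none := by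
  obtain ⟨items⟩ := d
  have hh : items.map (·.2) = [] := h
  have : items = [] := List.map_eq_nil_iff.mp hh
  subst this
  rfl

theorem pv_foldl_opt_append {σ : Type} (h : Int → Option σ) :
    ∀ (L : List Int) (acc : List σ),
      L.foldl (fun acc i => (h i).elim acc (fun x => acc ++ [x])) acc
        = acc ++ L.filterMap h := by
  intro L
  induction L with
  | nil => intro acc; simp
  | cons a L ih =>
    intro acc
    simp only [List.foldl_cons, List.filterMap_cons]
    cases ha : h a with
    | none => simpa using ih acc
    | some x => simp [ih (acc ++ [x])]

theorem pv_flatMap_filterMap {σ β : Type} (h : Int → Option σ) (g : σ → List β) :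
    ∀ L : List Int,
      (L.filterMap h).flatMap g = L.flatMap (fun i => (h i).elim [] g) := by
  intro L
  induction L with
  | nil => simp
  | cons a L ih =>
    simp only [List.filterMap_cons, List.flatMap_cons]
    cases ha : h a with
    | none => simpa using ih
    | some s => simp [ih]

theorem pv_flatMap_sing {α β : Type} (f : α → β) :
    ∀ l : List α, l.flatMap (fun x => [f x]) = l.map f := by
  intro l
  induction l with
  | nil => rfl
  | cons a l ih => simp only [List.flatMap_cons, List.map_cons, List.singleton_append, ih]

theorem pv_flatMap_congr {α β : Type} (L : List α) (f g : α → List β)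
    (h : ∀ x ∈ L, f x = g x) : L.flatMap f = L.flatMap g := by
  induction L with
  | nil => rfl
  | cons a L ih =>
    simp only [List.flatMap_cons]
    rw [h a (List.mem_cons_self), ih (fun x hx => h x (List.mem_cons_of_mem _ hx))]

theorem findA_fuel :
    ∀ (f g : Nat) (cities : List String) (d : PySem.Dict (String × String) Int)
      (budget : Int) (pairs : List (String × String)) (cost : Int),
      cities.length < f → cities.length < g →
      findA f cities d budget pairs cost = findA g cities d budget pairs cost := by
  intro f
  induction f with
  | zero => intro g cities d budget pairs cost hf; omega
  | succ f ih =>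
    intro g cities d budget pairs cost hf hg
    match g, hg with
    | (g + 1), hg =>
      simp only [findA]
      cases hc : cities.isEmpty with
      | true => rfl
      | false =>
        simp only [Bool.false_eq_true, if_false]
        cases hmin : PySem.List.min? (PySem.Dict.values d) (fun v => v) with
        | none => rfl
        | some m =>
          apply PySem.List.foldl_congr_mem
          intro acc i hi
          obtain ⟨hi1, hi2⟩ := (PySem.List.mem_pyRange_one).mp hi
          have hn2 : 2 ≤ cities.length := by
            have : (1 : Int) < (cities.length : Int) := lt_of_le_of_lt hi1 hi2
            exact_mod_cast this
          have hlen := pv_len_child cities i hi1 hi2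
          cases hgd : PySem.Dict.get? d (PySem.List.pyGetD cities 0 "", PySem.List.pyGetD cities i "") with
          | none => rfl
          | some c =>
            simp only []
            split
            · rfl
            · rw [ih g _ d budget _ _ (by omega) (by omega)]

-- one round of B is the in-order concatenation of each state's children
theorem pv_roundB_eq (d : PySem.Dict (String × String) Int) (budget minCost : Int)
    (states : List (List String × List (String × String) × Int)) :
    roundB d budget minCost states = states.flatMap (pvCh d budget minCost) := by
  unfold roundB
  have hbody :
      (fun (new_states : List (List String × List (String × String) × Int)) s =>
        match s with
        | (cities, pairs, cost) =>
          (PySem.List.pyRange 1 (cities.length : Int) 1).foldl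
            (fun new_states i =>
              match PySem.Dict.get? d (PySem.List.pyGetD cities 0 "", PySem.List.pyGetD cities i "") with
              | none => new_states
              | some c =>
                if cost + c ≤ budget - (PySem.Int.floordiv (cities.length : Int) 2 - 1) * minCost then
                  new_states ++
                    [(PySem.List.slice cities (some 1) (some i) ++ PySem.List.slice cities (some (i + 1)) none,
                      pairs ++ [(PySem.List.pyGetD cities 0 "", PySem.List.pyGetD cities i "")], cost + c)]
                else new_states)
            new_states)
      = (fun new_states s => new_states ++ pvCh d budget minCost s) := by
    funext ns s
    obtain ⟨cities, pairs, cost⟩ := s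
    have hinner :
        (fun (acc : List (List String × List (String × String) × Int)) (i : Int) =>
          match PySem.Dict.get? d (PySem.List.pyGetD cities 0 "", PySem.List.pyGetD cities i "") with
          | none => acc
          | some c =>
            if cost + c ≤ budget - (PySem.Int.floordiv (cities.length : Int) 2 - 1) * minCost then
              acc ++
                [(PySem.List.slice cities (some 1) (some i) ++ PySem.List.slice cities (some (i + 1)) none,
                  pairs ++ [(PySem.List.pyGetD cities 0 "", PySem.List.pyGetD cities i "")], cost + c)]
            else acc)
        = (fun acc i =>
            (pvH d cities pairs cost (budget - (PySem.Int.floordiv (cities.length : Int) 2 - 1) * minCost) i).elim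
              acc (fun x => acc ++ [x])) := by
      funext acc i
      simp only [pvH]
      cases hgd : PySem.Dict.get? d (PySem.List.pyGetD cities 0 "", PySem.List.pyGetD cities i "") with
      | none => rfl
      | some c =>
        simp only []
        by_cases hP : cost + c ≤ budget - (PySem.Int.floordiv (cities.length : Int) 2 - 1) * minCost
        · rw [if_pos hP, if_pos hP]; rfl
        · rw [if_neg hP, if_neg hP]; rfl
    simp only []
    rw [hinner, pv_foldl_opt_append]
    rfl
  rw [hbody, PySem.List.foldl_append_eq_flatMap (pvCh d budget minCost)]
  simp

-- every child pushed from a state with L cities carries L - 2 cities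
theorem pv_ch_len (d : PySem.Dict (String × String) Int) (budget minCost : Int)
    (s : List String × List (String × String) × Int) (t : List String × List (String × String) × Int)
    (ht : t ∈ pvCh d budget minCost s) : t.1.length = s.1.length - 2 := by
  obtain ⟨i, hiL, his⟩ := List.mem_filterMap.mp ht
  obtain ⟨hi1, hi2⟩ := (PySem.List.mem_pyRange_one).mp hiL
  simp only [pvH] at his
  cases hgd : PySem.Dict.get? d (PySem.List.pyGetD s.1 0 "", PySem.List.pyGetD s.1 i "") with
  | none => rw [hgd] at his; cases his
  | some c =>
    rw [hgd] at his
    simp only [] at his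
    split at his
    · cases his
      exact pv_len_child s.1 i hi1 hi2
    · cases his

-- a state's children expand, in order, to exactly A's value at that state
theorem pv_ch_node (d : PySem.Dict (String × String) Int) (budget minCost : Int)
    (hm : minCost = (match PySem.List.min? (PySem.Dict.values d) (fun v => v) with
                     | none => 0 | some m => m))
    (s : List String × List (String × String) × Int) (hne : s.1.isEmpty = false) :
    (pvCh d budget minCost s).flatMap
        (fun t => findA (s.1.length - 2 + 1) t.1 d budget t.2.1 t.2.2)
      = findA (s.1.length + 1) s.1 d budget s.2.1 s.2.2 := by
  obtain ⟨cities, pairs, cost⟩ := s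
  simp only [] at hne ⊢
  have hn1 : 1 ≤ cities.length := by
    cases cities with
    | nil => simp at hne
    | cons a t => simp
  cases hmin : PySem.List.min? (PySem.Dict.values d) (fun v => v) with
  | none =>
    have hvals : PySem.Dict.values d = [] :=
      (PySem.List.min?_eq_none_iff (xs := PySem.Dict.values d) (key := fun v => v)).mp hmin
    have hch : pvCh d budget minCost (cities, pairs, cost) = [] := by
      simp only [pvCh, pvH]
      rw [List.filterMap_eq_nil_iff.mpr]
      intro i _
      rw [pv_get?_of_values_nil hvals]
    rw [hch]
    simp only [findA, hne, Bool.false_eq_true, if_false, hmin]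
    rfl
  | some m =>
    have hm' : minCost = m := by rw [hm, hmin]
    subst hm'
    have hRHS : findA (cities.length + 1) cities d budget pairs cost
        = (PySem.List.pyRange 1 (cities.length : Int) 1).flatMap (pvG d cities pairs cost budget minCost) := by
      simp only [findA, hne, Bool.false_eq_true, if_false, hmin]
      have hAbody :
          (fun (res : List (List (String × String))) (i : Int) =>
            match PySem.Dict.get? d (PySem.List.pyGetD cities 0 "", PySem.List.pyGetD cities i "") with
            | none => res
            | some c =>
              if c + cost > budget - (PySem.Int.floordiv (cities.length : Int) 2 - 1) * minCost then res
              else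
                res ++ findA cities.length
                  (PySem.List.slice cities (some 1) (some i) ++ PySem.List.slice cities (some (i + 1)) none)
                  d budget (pairs ++ [(PySem.List.pyGetD cities 0 "", PySem.List.pyGetD cities i "")]) (c + cost))
          = (fun res i => res ++ pvG d cities pairs cost budget minCost i) := by
        funext res i
        simp only [pvG]
        cases hgd : PySem.Dict.get? d (PySem.List.pyGetD cities 0 "", PySem.List.pyGetD cities i "") with
        | none => simp
        | some c =>
          simp only []
          by_cases hP : c + cost > budget - (PySem.Int.floordiv (cities.length : Int) 2 - 1) * minCost
          · rw [if_pos hP, if_pos hP]; simp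
          · rw [if_neg hP, if_neg hP]
      rw [hAbody, PySem.List.foldl_append_eq_flatMap (pvG d cities pairs cost budget minCost), List.nil_append]
    rw [hRHS]
    simp only [pvCh]
    rw [pv_flatMap_filterMap]
    apply pv_flatMap_congr
    intro i hiL
    obtain ⟨hi1, hi2⟩ := (PySem.List.mem_pyRange_one).mp hiL
    have hn2 : 2 ≤ cities.length := by
      have : (1 : Int) < (cities.length : Int) := lt_of_le_of_lt hi1 hi2
      exact_mod_cast this
    have hlen := pv_len_child cities i hi1 hi2
    simp only [pvH, pvG]
    cases hgd : PySem.Dict.get? d (PySem.List.pyGetD cities 0 "", PySem.List.pyGetD cities i "") with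
    | none => rfl
    | some c =>
      simp only []
      by_cases hcb : cost + c ≤ budget - (PySem.Int.floordiv (cities.length : Int) 2 - 1) * minCost
      · have hnot : ¬ (c + cost > budget - (PySem.Int.floordiv (cities.length : Int) 2 - 1) * minCost) := by
          linarith
        rw [if_pos hcb, if_neg hnot, show cost + c = c + cost from Int.add_comm cost c]
        exact findA_fuel _ cities.length _ d budget _ _
          (by show (PySem.List.slice cities (some 1) (some i) ++ PySem.List.slice cities (some (i + 1)) none).length < cities.length - 2 + 1
              omega)
          (by show (PySem.List.slice cities (some 1) (some i) ++ PySem.List.slice cities (some (i + 1)) none).length < cities.length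
              omega)
      · have hgt : c + cost > budget - (PySem.Int.floordiv (cities.length : Int) 2 - 1) * minCost := by
          linarith
        rw [if_neg hcb, if_pos hgt]
        rfl

-- main invariant: B's remaining loop, projected to pair lists, equals the in-order
-- concatenation of A's values at the frontier states (all of equal city count L)
theorem pv_loopB_eq (d : PySem.Dict (String × String) Int) (budget minCost : Int)
    (hm : minCost = (match PySem.List.min? (PySem.Dict.values d) (fun v => v) with
                     | none => 0 | some m => m)) :
    ∀ (fuel L : Nat) (states : List (List String × List (String × String) × Int)),
      (∀ s ∈ states, s.1.length = L) → L ≤ fuel →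
      (loopB fuel d budget minCost states).map (fun s => s.2.1)
        = states.flatMap (fun s => findA (L + 1) s.1 d budget s.2.1 s.2.2) := by
  intro fuel
  induction fuel with
  | zero =>
    intro L states hlen hle
    have hL : L = 0 := by omega
    subst hL
    simp only [loopB]
    rw [pv_flatMap_congr states _ (fun s => [s.2.1]) (by
      intro s hs
      have : s.1 = [] := List.length_eq_zero_iff.mp (hlen s hs)
      simp [findA, this])]
    rw [pv_flatMap_sing]
  | succ fuel ih =>
    intro L states hlen hle
    cases states with
    | nil => simp [loopB]
    | cons s rest =>
      obtain ⟨cities, pairs, cost⟩ := s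
      simp only [loopB]
      cases hc : cities.isEmpty with
      | true =>
        have hL : L = 0 := by
          have := hlen (cities, pairs, cost) List.mem_cons_self
          simp only [] at this
          rw [List.isEmpty_iff.mp hc] at this
          simpa using this.symm
        subst hL
        simp only [if_true]
        rw [pv_flatMap_congr ((cities, pairs, cost) :: rest) _ (fun s => [s.2.1]) (by
          intro t ht
          have : t.1 = [] := List.length_eq_zero_iff.mp (hlen t ht)
          simp [findA, this])]
        rw [pv_flatMap_sing]
      | false =>
        simp only [Bool.false_eq_true, if_false]
        have hLpos : 1 ≤ L := by
          have := hlen (cities, pairs, cost) List.mem_cons_self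
          simp only [] at this
          cases cities with
          | nil => simp at hc
          | cons a t => simp at this; omega
        rw [pv_roundB_eq,
            ih (L - 2) _ (by
              intro t ht
              obtain ⟨u, hu, htu⟩ := List.mem_flatMap.mp ht
              rw [pv_ch_len d budget minCost u t htu, hlen u hu])
              (by omega),
            List.flatMap_assoc]
        apply pv_flatMap_congr
        intro u hu
        have hulen := hlen u hu
        have hune : u.1.isEmpty = false := by
          cases h1 : u.1 with
          | nil => rw [h1] at hulen; simp at hulen; omega
          | cons a t => rfl
        have := pv_ch_node d budget minCost hm u hune
        rw [hlen u hu] at this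
        exact this

-- ===== VERDICT (by name: the statement is the Claim_ definition above) =====
theorem find_pairings_spec : Claim_equal_find_pairings := by
  intro unpaired_cities municipality_cost budget current_pairs current_cost _hdom _hpre
  unfold Spec_find_pairings find_pairings find_pairings_alt
  rw [pv_loopB_eq (pvDict municipality_cost) budget _ rfl
        (unpaired_cities.length + 1) unpaired_cities.length
        [(unpaired_cities, current_pairs.getD [], current_cost)]
        (by intro s hs; simp at hs; rw [hs]) (by omega)]
  simp
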